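-- pv_equiv track=rewrite | github.com/momotomo/loto_ai_project | promotion_review.py | _consecutive_settransformer_signal
-- ===== SOURCE A (Python) =====
-- from typing import Any
--
-- def _consecutive_settransformer_signal(accepted: list[dict[str, Any]]) -> int:
--     """Count consecutive accepted campaigns with whether_to_try_pma_or_isab_next=True."""
--     count = 0
--     for entry in reversed(accepted):
--         if entry.get("whether_to_try_pma_or_isab_next", False):
--             count += 1
--         else:
--             break
--     return count
-- ===== SOURCE B (Python) =====
-- def _consecutive_settransformer_signal(accepted: list) -> int:
--     """Single forward pass: running counter reset to 0 on a False flag."""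
--     count = 0
--     for entry in accepted:
--         count = count + 1 if entry.get("whether_to_try_pma_or_isab_next", False) else 0
--     return count
-- ===== Notes on version B (the rewrite author's own statement) =====
-- stated objective: alternative
-- what changed: B replaces A's reversed traversal with early break by one forward pass keeping a running counter reset on each False flag; the final counter is the trailing True-run length.
import Mathlib
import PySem

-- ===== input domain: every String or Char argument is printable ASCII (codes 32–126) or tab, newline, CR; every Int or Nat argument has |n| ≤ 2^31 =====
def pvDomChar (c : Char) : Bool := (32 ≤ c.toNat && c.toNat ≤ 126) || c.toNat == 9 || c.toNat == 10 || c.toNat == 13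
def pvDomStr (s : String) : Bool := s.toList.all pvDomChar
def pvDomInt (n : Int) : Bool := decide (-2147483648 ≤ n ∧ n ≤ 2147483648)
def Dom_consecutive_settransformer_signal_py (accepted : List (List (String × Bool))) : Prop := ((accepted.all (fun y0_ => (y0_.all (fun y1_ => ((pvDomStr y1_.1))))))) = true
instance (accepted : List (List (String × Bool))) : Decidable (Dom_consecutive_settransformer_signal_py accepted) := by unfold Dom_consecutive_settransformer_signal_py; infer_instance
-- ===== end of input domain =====

-- B: one forward pass with a reset counter instead of A's reversed walk with break (alternative decomposition; return value only).
-- ===== PORT A =====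
-- A's loop: for entry in reversed(accepted): if entry.get(...): count += 1 else: break
def pvLoopA (count : Int) : List (List (String × Bool)) → Int
  | [] => count
  | e :: rest =>
      if PySem.Dict.getD (PySem.Dict.mk e) "whether_to_try_pma_or_isab_next" false then
        pvLoopA (count + 1) rest
      else count

def consecutive_settransformer_signal_py (accepted : List (List (String × Bool))) : Int :=
  pvLoopA 0 accepted.reverse

-- ===== PORT B =====
def consecutive_settransformer_signal_py_alt (accepted : List (List (String × Bool))) : Int :=
  accepted.foldl
    (fun count e =>
      if PySem.Dict.getD (PySem.Dict.mk e) "whether_to_try_pma_or_isab_next" false then count + 1 else 0)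
    0

-- ===== PRECONDITION & SPEC =====
def Spec_consecutive_settransformer_signal_py (accepted : List (List (String × Bool))) (out : Int) : Prop := out = consecutive_settransformer_signal_py_alt accepted
instance (accepted : List (List (String × Bool))) (out : Int) : Decidable (Spec_consecutive_settransformer_signal_py accepted out) := by unfold Spec_consecutive_settransformer_signal_py; infer_instance

-- ===== CLAIM (what is proved, stated in full; the proofs are below) =====
def Claim_equal_consecutive_settransformer_signal_py : Prop := ∀ (accepted : List (List (String × Bool))), Dom_consecutive_settransformer_signal_py accepted → Spec_consecutive_settransformer_signal_py accepted (consecutive_settransformer_signal_py accepted)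

-- ===== LEMMAS AND PROOFS =====

theorem pvLoopA_shift (l : List (List (String × Bool))) (c : Int) :
    pvLoopA c l = c + pvLoopA 0 l := by
  induction l generalizing c with
  | nil => simp [pvLoopA]
  | cons e rest ih =>
      simp only [pvLoopA]
      split_ifs with h
      · rw [ih (c + 1), ih (0 + 1)]; ring
      · simp

theorem pv_rev_eq_fold (accepted : List (List (String × Bool))) :
    pvLoopA 0 accepted.reverse =
      accepted.foldl
        (fun count e =>
          if PySem.Dict.getD (PySem.Dict.mk e) "whether_to_try_pma_or_isab_next" false then count + 1 else 0)
        0 := by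
  induction accepted using List.reverseRecOn with
  | nil => simp [pvLoopA]
  | append_singleton xs x ih =>
      rw [List.reverse_append, List.foldl_append]
      simp only [List.reverse_singleton, List.singleton_append, List.foldl_cons, List.foldl_nil,
        pvLoopA]
      split_ifs with h
      · rw [pvLoopA_shift, ih]; ring
      · simp

-- ===== VERDICT =====
theorem consecutive_settransformer_signal_py_spec : Claim_equal_consecutive_settransformer_signal_py := by
  intro accepted _
  unfold Spec_consecutive_settransformer_signal_py consecutive_settransformer_signal_py consecutive_settransformer_signal_py_alt
  exact pv_rev_eq_fold accepted
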